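-- pv_equiv track=rewrite | github.com/Scalas/PS_LeetCode | solutions/sol_2264.py | largest_good_integer
-- ===== SOURCE A (Python) =====
-- def largest_good_integer(num: str) -> str:
--     pre = num[0]
--     cnt = 1
--     answer = ""
--     for d in num[1:]:
--         if d == pre:
--             cnt += 1
--         else:
--             if cnt >= 3 and pre > answer:
--                 answer = pre
--             pre, cnt = d, 1
--     if cnt >= 3 and pre >= answer:
--         answer = pre
--     return answer * 3
-- ===== SOURCE B (Python) =====
-- def _take(best, c):
--     # keep the larger of the current best and c (None = nothing yet)
--     if best is None or best < c:
--         return c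
--     return best
--
--
-- def largest_good_integer(num: str) -> str:
--     best = None
--     for a, b, c in zip(num, num[1:], num[2:]):
--         if a == b == c:
--             best = _take(best, a)
--     return "" if best is None else best * 3
-- ===== Notes on version B (the rewrite author's own statement) =====
-- stated objective: idiomatic
-- what changed: Replaces the run-length counter (pre/cnt state machine plus two max-update sites) with a single zip-based sliding window over all length-3 windows, keeping only the largest character whose window is constant.
-- crash fix: On the empty string A raises IndexError (num[0]); B's window scan finds no triple and returns "". — e.g. on largest_good_integer(""): A raises IndexError, B returns ""
import Mathlib
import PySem

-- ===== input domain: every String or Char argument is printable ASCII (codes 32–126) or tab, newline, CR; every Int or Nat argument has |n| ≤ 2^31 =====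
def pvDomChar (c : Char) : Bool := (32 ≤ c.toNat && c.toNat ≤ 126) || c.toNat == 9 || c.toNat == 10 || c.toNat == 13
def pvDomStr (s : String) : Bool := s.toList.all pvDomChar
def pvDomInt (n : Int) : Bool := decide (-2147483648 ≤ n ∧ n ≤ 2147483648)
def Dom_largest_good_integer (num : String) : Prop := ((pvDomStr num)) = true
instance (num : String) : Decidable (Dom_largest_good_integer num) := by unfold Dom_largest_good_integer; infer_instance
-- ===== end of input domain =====

-- B replaces A's run-length counter with a zip-based sliding-window scan (idiomatic; same cost).

-- ===== PORT A =====
-- loop over num[1:] carrying (pre, cnt, answer); answer is "" or a one-char string (List Char, Python's str '<' = list lex '<')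
def aLoop : List Char → Char → Nat → List Char → Char × Nat × List Char
  | [], pre, cnt, ans => (pre, cnt, ans)
  | d :: t, pre, cnt, ans =>
    if d = pre then aLoop t pre (cnt + 1) ans
    else aLoop t d 1 (if 3 ≤ cnt ∧ ans < [pre] then [pre] else ans)

def largest_good_integer (num : String) : String :=
  match num.toList with
  | [] => ""   -- Python evaluates num[0] here and raises IndexError; excluded by Pre_
  | c :: rest =>
    let r := aLoop rest c 1 []
    let ans := if 3 ≤ r.2.1 ∧ ¬ ([r.1] < r.2.2) then [r.1] else r.2.2   -- final `cnt >= 3 and pre >= answer`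
    String.ofList (ans ++ ans ++ ans)   -- answer * 3

-- ===== PORT B =====
-- _take(best, c): keep the larger of best (None = nothing yet) and c
def optMax (o : Option Char) (c : Char) : Option Char :=
  match o with
  | none => some c
  | some x => if x < c then some c else some x

def largest_good_integer_alt (num : String) : String :=
  let l := num.toList
  let best := (l.zip ((l.drop 1).zip (l.drop 2))).foldl
      (fun best t => if t.1 = t.2.1 ∧ t.2.1 = t.2.2 then optMax best t.1 else best)
      (none : Option Char)
  match best with
  | none => ""
  | some c => String.ofList [c, c, c]

-- ===== PRECONDITION & SPEC =====
-- Pre_ excludes only the empty string, on which A raises IndexError (num[0]).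
def Pre_largest_good_integer (num : String) : Prop := num ≠ ""
instance (num : String) : Decidable (Pre_largest_good_integer num) := by unfold Pre_largest_good_integer; infer_instance
def pvWitness_largest_good_integer : String := "a999b"

-- On the empty string A raises IndexError (num[0]); B's window scan finds no triple and returns "".
def Raises_largest_good_integer (num : String) : Prop := num = ""
instance (num : String) : Decidable (Raises_largest_good_integer num) := by unfold Raises_largest_good_integer; infer_instance
def pvRaiseWitness_largest_good_integer : String := ""
def pvRaiseWitnessOut_largest_good_integer : String := ""

def Spec_largest_good_integer (num : String) (out : String) : Prop := out = largest_good_integer_alt num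
instance (num : String) (out : String) : Decidable (Spec_largest_good_integer num out) := by unfold Spec_largest_good_integer; infer_instance

-- ===== CLAIM (what is proved, stated in full; the proofs are below) =====
def Claim_equal_largest_good_integer : Prop := ∀ (num : String), Dom_largest_good_integer num → Pre_largest_good_integer num → Spec_largest_good_integer num (largest_good_integer num)
def Claim_raises_largest_good_integer : Prop := (∀ (num : String), Dom_largest_good_integer num → Raises_largest_good_integer num → ¬ Pre_largest_good_integer num) ∧ (Dom_largest_good_integer (pvRaiseWitness_largest_good_integer) ∧ Raises_largest_good_integer (pvRaiseWitness_largest_good_integer) ∧ largest_good_integer_alt (pvRaiseWitness_largest_good_integer) = pvRaiseWitnessOut_largest_good_integer)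

-- ===== LEMMAS AND PROOFS =====

-- the characters of all constant length-3 windows, in order
def tripleChars : List Char → List Char
  | a :: b :: c :: t => (if a = b ∧ b = c then [a] else []) ++ tripleChars (b :: c :: t)
  | _ => []

def optToList : Option Char → List Char
  | none => []
  | some c => [c]

theorem optMax_idem (o : Option Char) (c : Char) : optMax (optMax o c) c = optMax o c := by
  cases o with
  | none => simp [optMax]
  | some x =>
      by_cases h : x < c <;> simp [optMax, h]

theorem foldl_optMax_replicate (k : Nat) (c : Char) (o : Option Char) :
    List.foldl optMax o (List.replicate k c) = if k = 0 then o else optMax o c := by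
  induction k generalizing o with
  | zero => simp
  | succ n ih =>
      simp only [List.replicate_succ, List.foldl_cons, ih]
      cases n with
      | zero => simp
      | succ m => simp [optMax_idem]

-- B's zip-window fold is the optMax fold over tripleChars
theorem bfold_eq (l : List Char) (o : Option Char) :
    (l.zip ((l.drop 1).zip (l.drop 2))).foldl
      (fun best t => if t.1 = t.2.1 ∧ t.2.1 = t.2.2 then optMax best t.1 else best) o
    = List.foldl optMax o (tripleChars l) := by
  induction l using tripleChars.induct generalizing o with
  | case1 a b c t ih =>
      simp only [List.drop, List.zip_cons_cons, List.foldl_cons, tripleChars]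
      by_cases h : a = b ∧ b = c
      · simp only [if_pos h, List.singleton_append, List.foldl_cons]
        exact ih _
      · simp only [if_neg h, List.nil_append]
        exact ih _
  | case2 l h =>
      rcases l with _ | ⟨a, _ | ⟨b, _ | ⟨c, t⟩⟩⟩
      · simp [tripleChars]
      · simp [tripleChars]
      · simp [tripleChars]
      · exact absurd rfl (h a b c t)

theorem tripleChars_one (pre : Char) (s : List Char) (hs : s.head? ≠ some pre) :
    tripleChars (pre :: s) = tripleChars s := by
  rcases s with _ | ⟨x, _ | ⟨y, t⟩⟩
  · simp [tripleChars]
  · simp [tripleChars]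
  · have hx : ¬ pre = x := fun h => hs (by simp [h])
    simp [tripleChars, hx]

theorem tripleChars_two (pre : Char) (s : List Char) (hs : s.head? ≠ some pre) :
    tripleChars (pre :: pre :: s) = tripleChars (pre :: s) := by
  rcases s with _ | ⟨x, t⟩
  · simp [tripleChars]
  · have hx : ¬ pre = x := fun h => hs (by simp [h])
    simp [tripleChars, hx]

theorem tripleChars_replicate (cnt : Nat) (pre : Char) (s : List Char)
    (hs : s.head? ≠ some pre) :
    tripleChars (List.replicate cnt pre ++ s)
      = List.replicate (cnt - 2) pre ++ tripleChars s := by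
  induction cnt using Nat.strong_induction_on with
  | _ cnt ih =>
    match cnt with
    | 0 => simp
    | 1 => simpa using tripleChars_one pre s hs
    | 2 =>
        have := tripleChars_two pre s hs
        simpa [this] using tripleChars_one pre s hs
    | (n + 3) =>
        have hrep : List.replicate (n + 3) pre ++ s
            = pre :: pre :: pre :: (List.replicate n pre ++ s) := by
          simp [List.replicate_succ]
        have hrep2 : pre :: pre :: (List.replicate n pre ++ s)
            = List.replicate (n + 2) pre ++ s := by
          simp [List.replicate_succ]
        rw [hrep]
        show (if pre = pre ∧ pre = pre then [pre] else [])
            ++ tripleChars (pre :: pre :: (List.replicate n pre ++ s))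
            = List.replicate (n + 3 - 2) pre ++ tripleChars s
        rw [hrep2, ih (n + 2) (by omega)]
        simp [List.replicate_succ]

theorem lex_singleton (a b : Char) : ([a] < [b]) ↔ a < b := by
  constructor
  · intro h
    cases h with
    | rel h => exact h
    | cons h => cases h
  · intro h
    exact List.Lex.rel h

-- A's conditional answer update computes optMax (value-level)
theorem update_eq (o : Option Char) (pre : Char) (cnt : Nat) :
    (if 3 ≤ cnt ∧ optToList o < [pre] then [pre] else optToList o)
      = optToList (if 3 ≤ cnt then optMax o pre else o) := by
  by_cases h3 : 3 ≤ cnt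
  · cases o with
    | none => simp [optToList, h3, optMax]
    | some x =>
        by_cases hlt : x < pre
        · simp [optToList, h3, lex_singleton, hlt, optMax]
        · simp [optToList, h3, lex_singleton, hlt, optMax]
  · simp [h3]

def aFinish : Char × Nat × List Char → List Char
  | (pre, cnt, ans) => if 3 ≤ cnt ∧ ¬ ([pre] < ans) then [pre] else ans

-- main invariant: A's loop result equals the optMax fold over the triples of the whole string
theorem aLoop_main (t : List Char) (pre : Char) (cnt : Nat) (o : Option Char)
    (hcnt : 1 ≤ cnt) :
    aFinish (aLoop t pre cnt (optToList o))
      = optToList (List.foldl optMax o (tripleChars (List.replicate cnt pre ++ t))) := by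
  induction t generalizing pre cnt o with
  | nil =>
      simp only [aLoop, aFinish, List.append_nil]
      rw [show tripleChars (List.replicate cnt pre) = List.replicate (cnt - 2) pre from by
        simpa [tripleChars] using tripleChars_replicate cnt pre [] (by simp)]
      rw [foldl_optMax_replicate]
      by_cases h3 : 3 ≤ cnt
      · have hk : ¬ (cnt - 2 = 0) := by omega
        rw [if_neg hk]
        cases o with
        | none => simp [optToList, h3, optMax]
        | some x =>
            by_cases hlt : pre < x
            · have : ¬ x < pre := lt_asymm hlt
              simp [optToList, h3, lex_singleton, hlt, optMax, this]
            · by_cases heq : x = pre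
              · subst heq
                simp [optToList, h3, optMax]
              · have hxp : x < pre := lt_of_le_of_ne (not_lt.mp hlt) heq
                simp [optToList, h3, lex_singleton, not_lt.mp hlt, optMax, hxp]
      · have hk : cnt - 2 = 0 := by omega
        simp [h3, hk]
  | cons d t' ih =>
      simp only [aLoop]
      by_cases hd : d = pre
      · subst hd
        rw [if_pos rfl]
        have hrep : List.replicate cnt d ++ d :: t' = List.replicate (cnt + 1) d ++ t' := by
          have : List.replicate (cnt + 1) d = List.replicate cnt d ++ [d] :=
            List.replicate_succ' ..
          simp [this]
        rw [hrep] at *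
        exact ih d (cnt + 1) o (by omega)
      · rw [if_neg hd, update_eq]
        have hIH := ih d 1 (if 3 ≤ cnt then optMax o pre else o) (le_refl 1)
        rw [hIH]
        rw [tripleChars_replicate cnt pre (d :: t') (by simpa using hd)]
        rw [List.foldl_append, foldl_optMax_replicate]
        have : (if cnt - 2 = 0 then o else optMax o pre) = (if 3 ≤ cnt then optMax o pre else o) := by
          by_cases h3 : 3 ≤ cnt
          · rw [if_neg (by omega), if_pos h3]
          · rw [if_pos (by omega), if_neg h3]
        rw [this]
        simp

-- ===== VERDICT (by name: the statement is the Claim_ definition above) =====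
theorem largest_good_integer_spec : Claim_equal_largest_good_integer := by
  intro num _ hpre
  unfold Spec_largest_good_integer largest_good_integer largest_good_integer_alt
  have hne : num.toList ≠ [] := fun h => hpre (by
    simpa using congrArg String.ofList h)
  match hL : num.toList with
  | [] => exact absurd hL hne
  | c :: rest =>
      simp only [bfold_eq]
      have hmain := aLoop_main rest c 1 none (le_refl 1)
      have hrep : List.replicate 1 c ++ rest = c :: rest := by simp
      rw [hrep] at hmain
      have hA : (let r := aLoop rest c 1 [];
          if 3 ≤ r.2.1 ∧ ¬ ([r.1] < r.2.2) then [r.1] else r.2.2)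
          = aFinish (aLoop rest c 1 (optToList none)) := by
        simp [aFinish, optToList]
      simp only [hA, hmain]
      cases List.foldl optMax none (tripleChars (c :: rest)) with
      | none => simp [optToList]
      | some m => simp [optToList]

@[simp] theorem largest_good_integer_raises : Claim_raises_largest_good_integer := by
  unfold Claim_raises_largest_good_integer
  exact ⟨fun num _ h hp => hp h, by decide⟩
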